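-- pv_equiv track=rewrite | github.com/LikeLionBE-Algorithm/Algorithm | 김희정/2. 구현/4_모의고사.py | solution
-- ===== SOURCE A (Python) =====
-- def solution(answers):
--     answer = []
--     answer_len = len(answers)
--
--     p1_answer = [1,2,3,4,5]*(answer_len//5+1)
--     p2_answer = [2,1,2,3,2,4,2,5]*(answer_len//8+1)
--     p3_answer = [3,3,1,1,2,2,4,4,5,5]*(answer_len//10+1)
--
--     result = [0,0,0] #정답 갯수 count
--
--     for i in range(answer_len):
--         if answers[i] == p1_answer[i]:
--             result[0] += 1
--         if answers[i] == p2_answer[i]: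
--             result[1] += 1
--         if answers[i] == p3_answer[i]:
--             result[2] += 1
--
--     #가장 많이 맞춘 사람 리턴
--     #동률도 추가
--     max_value = max(result)
--     for i in range(3):
--         if result[i] == max_value:
--             answer.append(i+1)
--
--     return answer
-- ===== SOURCE B (Python) =====
-- def solution(answers):
--     patterns = [[1, 2, 3, 4, 5],
--                 [2, 1, 2, 3, 2, 4, 2, 5],
--                 [3, 3, 1, 1, 2, 2, 4, 4, 5, 5]]
--     # Invert the data once: a table mapping (cycle length, residue, value) to
--     # how often that value occurs at positions with that residue; each score
--     # is then a lookup-sum over the pattern's entries, no comparison scan.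
--     buckets = {}
--     for i, a in enumerate(answers):
--         for L in (5, 8, 10):
--             key = (L, i % L, a)
--             buckets[key] = buckets.get(key, 0) + 1
--     scores = [sum(buckets.get((len(p), j, v), 0) for j, v in enumerate(p))
--               for p in patterns]
--     best = max(scores)
--     return [k + 1 for k, s in enumerate(scores) if s == best]
-- ===== Notes on version B (the rewrite author's own statement) =====
-- stated objective: alternative
-- what changed: B inverts the data: one pass builds a hash table keyed by (cycle length, residue, value) counting occurrences, and each supervisor's score becomes a sum of table lookups over the short base pattern - A's per-position comparison against three pre-tiled answer lists disappears.
import Mathlib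
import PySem

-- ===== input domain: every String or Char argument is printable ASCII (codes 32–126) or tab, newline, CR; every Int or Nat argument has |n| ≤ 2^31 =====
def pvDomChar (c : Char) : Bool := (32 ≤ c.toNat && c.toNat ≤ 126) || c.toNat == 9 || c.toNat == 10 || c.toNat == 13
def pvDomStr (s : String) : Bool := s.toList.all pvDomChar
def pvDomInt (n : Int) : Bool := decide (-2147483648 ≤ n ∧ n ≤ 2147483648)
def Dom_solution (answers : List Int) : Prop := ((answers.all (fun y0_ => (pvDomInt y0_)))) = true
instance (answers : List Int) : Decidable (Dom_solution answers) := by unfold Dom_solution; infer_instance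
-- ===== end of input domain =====

-- B replaces A's comparison against three pre-tiled answer lists by a single pass that
-- builds a (cycle length, residue, value) → count table, scores being lookup-sums over
-- the short base patterns (alternative decomposition, same asymptotic cost).

-- ===== PORT A =====
-- Python `xs * k` (list repetition, k ≥ 0 here since len//c+1 ≥ 1)
def pyRepeat (xs : List Int) : Nat → List Int
  | 0 => []
  | k + 1 => xs ++ pyRepeat xs k

def solution (answers : List Int) : List Int :=
  let n := answers.length
  -- answer_len // 5 + 1 etc.: n ≥ 0 so Nat division agrees with Python's //
  let p1 := pyRepeat [1, 2, 3, 4, 5] (n / 5 + 1)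
  let p2 := pyRepeat [2, 1, 2, 3, 2, 4, 2, 5] (n / 8 + 1)
  let p3 := pyRepeat [3, 3, 1, 1, 2, 2, 4, 4, 5, 5] (n / 10 + 1)
  -- answers[i], p*_answer[i]: i ∈ range(n) is always in range, so getD is exact
  let result := (List.range n).foldl
    (fun (r : Int × Int × Int) i =>
      let r := if answers.getD i 0 = p1.getD i 0 then (r.1 + 1, r.2.1, r.2.2) else r
      let r := if answers.getD i 0 = p2.getD i 0 then (r.1, r.2.1 + 1, r.2.2) else r
      if answers.getD i 0 = p3.getD i 0 then (r.1, r.2.1, r.2.2 + 1) else r)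
    (0, 0, 0)
  -- max(result) on the non-empty 3-list
  let maxValue := (PySem.List.max? [result.1, result.2.1, result.2.2] (fun x => x)).getD 0
  (List.range 3).foldl
    (fun acc i => if [result.1, result.2.1, result.2.2].getD i 0 = maxValue
                  then acc ++ [(i : Int) + 1] else acc) []

-- ===== PORT B =====
-- buckets[key] = buckets.get(key, 0) + 1 over i, a = enumerate(answers), L in (5, 8, 10);
-- enumerate indices i are ≥ 0 and 5, 8, 10 > 0, so PySem.Int.mod is Python's i % L exactly
def solution_alt (answers : List Int) : List Int :=
  let patterns : List (List Int) :=
    [[1, 2, 3, 4, 5], [2, 1, 2, 3, 2, 4, 2, 5], [3, 3, 1, 1, 2, 2, 4, 4, 5, 5]]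
  let buckets := (PySem.List.enumerate answers).foldl
    (fun (d : PySem.Dict (Int × Int × Int) Int) p =>
      [(5 : Int), 8, 10].foldl
        (fun d L =>
          let key := (L, PySem.Int.mod p.1 L, p.2)
          d.insert key (d.getD key 0 + 1)) d)
    PySem.Dict.empty
  -- sum(buckets.get((len(p), j, v), 0) for j, v in enumerate(p))
  let scores := patterns.map (fun p =>
    (PySem.List.enumerate p).foldl
      (fun s q => s + buckets.getD ((p.length : Int), q.1, q.2) 0) 0)
  let m := (PySem.List.max? scores (fun x => x)).getD 0
  (PySem.List.enumerate scores).foldl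
    (fun acc (q : Int × Int) => if q.2 = m then acc ++ [q.1 + 1] else acc) []

-- ===== PRECONDITION & SPEC =====
def Spec_solution (answers : List Int) (out : List Int) : Prop := out = solution_alt answers
instance (answers : List Int) (out : List Int) : Decidable (Spec_solution answers out) := by unfold Spec_solution; infer_instance

-- ===== CLAIM (what is proved, stated in full; the proofs are below) =====
def Claim_equal_solution : Prop := ∀ (answers : List Int), Dom_solution answers → Spec_solution answers (solution answers)

-- ===== LEMMAS AND PROOFS =====

/-- count of indices `i < n` with `f i`, accumulated back-to-front like a range fold -/
def cnt (f : Nat → Prop) [DecidablePred f] : Nat → Int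
  | 0 => 0
  | n + 1 => cnt f n + (if f n then 1 else 0)

theorem cnt_congr (f g : Nat → Prop) [DecidablePred f] [DecidablePred g] :
    ∀ n, (∀ i, i < n → (f i ↔ g i)) → cnt f n = cnt g n := by
  intro n
  induction n with
  | zero => intro _; rfl
  | succ n ih =>
    intro h
    simp only [cnt, ih (fun i hi => h i (Nat.lt_succ_of_lt hi))]
    by_cases hf : f n
    · rw [if_pos hf, if_pos ((h n (Nat.lt_succ_self n)).mp hf)]
    · rw [if_neg hf, if_neg (fun hg => hf ((h n (Nat.lt_succ_self n)).mpr hg))]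

theorem cnt_shift (f : Nat → Prop) [DecidablePred f] :
    ∀ n, cnt f (n + 1) = (if f 0 then (1:Int) else 0) + cnt (fun i => f (i + 1)) n := by
  intro n
  induction n with
  | zero => simp [cnt]
  | succ n ih =>
    show cnt f (n + 1) + (if f (n + 1) then (1:Int) else 0)
       = (if f 0 then (1:Int) else 0) + (cnt (fun i => f (i + 1)) n + (if f (n + 1) then (1:Int) else 0))
    rw [ih]
    ring

theorem pyRepeat_getD (pat : List Int) (_hL : 0 < pat.length) :
    ∀ (k i : Nat), i < k * pat.length → (pyRepeat pat k).getD i 0 = pat.getD (i % pat.length) 0 := by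
  intro k
  induction k with
  | zero => intro i hi; simp at hi
  | succ k ih =>
    intro i hi
    by_cases h : i < pat.length
    · rw [pyRepeat, List.getD, List.getElem?_append_left h, Nat.mod_eq_of_lt h]; rfl
    · rw [Nat.not_lt] at h
      rw [pyRepeat, List.getD, List.getElem?_append_right h]
      rw [Nat.mod_eq_sub_mod h]
      have : i - pat.length < k * pat.length := by
        have h3 : (k + 1) * pat.length = k * pat.length + pat.length := by ring
        omega
      exact ih (i - pat.length) this

theorem lt_bound (n L : Nat) (hL : 0 < L) : n < (n / L + 1) * L := by
  have h1 := Nat.div_add_mod n L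
  have h2 := Nat.mod_lt n hL
  have h3 : (n / L + 1) * L = L * (n / L) + L := by ring
  omega

theorem tripleFold (f g h : Nat → Prop) [DecidablePred f] [DecidablePred g] [DecidablePred h] (n : Nat) :
    (List.range n).foldl
      (fun (r : Int × Int × Int) i =>
        let r1 := if f i then (r.1 + 1, r.2.1, r.2.2) else r
        let r2 := if g i then (r1.1, r1.2.1 + 1, r1.2.2) else r1
        if h i then (r2.1, r2.2.1, r2.2.2 + 1) else r2)
      (0, 0, 0)
    = (cnt f n, cnt g n, cnt h n) := by
  suffices H : ∀ (a b c : Int),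
      (List.range n).foldl
        (fun (r : Int × Int × Int) i =>
          let r1 := if f i then (r.1 + 1, r.2.1, r.2.2) else r
          let r2 := if g i then (r1.1, r1.2.1 + 1, r1.2.2) else r1
          if h i then (r2.1, r2.2.1, r2.2.2 + 1) else r2)
        (a, b, c)
      = (a + cnt f n, b + cnt g n, c + cnt h n) by
    have := H 0 0 0; simpa using this
  induction n with
  | zero => intro a b c; simp [cnt]
  | succ n ih =>
    intro a b c
    rw [List.range_succ, List.foldl_append, ih]
    simp only [List.foldl_cons, List.foldl_nil, cnt]
    split_ifs <;> simp only [Prod.mk.injEq] <;> refine ⟨by ring, by ring, by ring⟩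


theorem cnt_false (f : Nat → Prop) [DecidablePred f] (h : ∀ i, ¬ f i) : ∀ n, cnt f n = 0 := by
  intro n
  induction n with
  | zero => rfl
  | succ n ih => simp [cnt, ih, h n]

theorem cnt_pattern (answers pat : List Int) (k : Nat) (hL : 0 < pat.length)
    (hk : answers.length ≤ k * pat.length) :
    cnt (fun i => answers.getD i 0 = (pyRepeat pat k).getD i 0) answers.length
    = cnt (fun i => answers.getD i 0 = pat.getD (i % pat.length) 0) answers.length := by
  apply cnt_congr
  intro i hi
  rw [pyRepeat_getD pat hL k i (by omega)]

theorem inner_getD (d : PySem.Dict (Int×Int×Int) Int) (i a : Int) (q : Int×Int×Int) :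
    ([(5:Int),8,10].foldl
      (fun d L => let key := (L, PySem.Int.mod i L, a); d.insert key (d.getD key 0 + 1)) d).getD q 0
  = d.getD q 0 + (if q = (5, PySem.Int.mod i 5, a) then 1 else 0)
               + (if q = (8, PySem.Int.mod i 8, a) then 1 else 0)
               + (if q = (10, PySem.Int.mod i 10, a) then 1 else 0) := by
  simp only [List.foldl_cons, List.foldl_nil, PySem.Dict.getD_insert, Prod.mk.injEq]
  split_ifs <;> simp_all


theorem build_getD :
    ∀ (xs : List Int) (s : Nat) (d : PySem.Dict (Int×Int×Int) Int) (q : Int×Int×Int),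
    ((PySem.List.enumerate xs (s:Int)).foldl
      (fun d p => [(5:Int),8,10].foldl
        (fun d L => let key := (L, PySem.Int.mod p.1 L, p.2); d.insert key (d.getD key 0 + 1)) d) d).getD q 0
  = d.getD q 0
    + cnt (fun i => q = (5, (((s+i) % 5 : Nat) : Int), xs.getD i 0)) xs.length
    + cnt (fun i => q = (8, (((s+i) % 8 : Nat) : Int), xs.getD i 0)) xs.length
    + cnt (fun i => q = (10, (((s+i) % 10 : Nat) : Int), xs.getD i 0)) xs.length := by
  intro xs
  induction xs with
  | nil => intro s d q; simp [PySem.List.enumerate_nil, cnt]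
  | cons a t ih =>
    intro s d q
    rw [PySem.List.enumerate_cons, List.foldl_cons]
    have hc : ((s : Int) + 1) = ((s + 1 : Nat) : Int) := by push_cast; ring
    rw [hc, ih (s + 1)]
    rw [inner_getD]
    have m5 : PySem.Int.mod (s:Int) 5 = ((s % 5 : Nat) : Int) := by
      exact_mod_cast PySem.Int.mod_natCast s 5
    have m8 : PySem.Int.mod (s:Int) 8 = ((s % 8 : Nat) : Int) := by
      exact_mod_cast PySem.Int.mod_natCast s 8
    have m10 : PySem.Int.mod (s:Int) 10 = ((s % 10 : Nat) : Int) := by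
      exact_mod_cast PySem.Int.mod_natCast s 10
    rw [List.length_cons, cnt_shift, cnt_shift, cnt_shift]
    have e1 : ∀ i, (a :: t).getD (i + 1) 0 = t.getD i 0 := fun i => rfl
    have k5 : cnt (fun i => q = ((5:Int), (((s + (i + 1)) % 5 : Nat) : Int), (a :: t).getD (i+1) 0)) t.length
            = cnt (fun i => q = ((5:Int), (((s + 1 + i) % 5 : Nat) : Int), t.getD i 0)) t.length := by
      apply cnt_congr; intro i _
      have h : s + (i + 1) = s + 1 + i := by omega
      rw [e1, h]
    have k8 : cnt (fun i => q = ((8:Int), (((s + (i + 1)) % 8 : Nat) : Int), (a :: t).getD (i+1) 0)) t.length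
            = cnt (fun i => q = ((8:Int), (((s + 1 + i) % 8 : Nat) : Int), t.getD i 0)) t.length := by
      apply cnt_congr; intro i _
      have h : s + (i + 1) = s + 1 + i := by omega
      rw [e1, h]
    have k10 : cnt (fun i => q = ((10:Int), (((s + (i + 1)) % 10 : Nat) : Int), (a :: t).getD (i+1) 0)) t.length
            = cnt (fun i => q = ((10:Int), (((s + 1 + i) % 10 : Nat) : Int), t.getD i 0)) t.length := by
      apply cnt_congr; intro i _
      have h : s + (i + 1) = s + 1 + i := by omega
      rw [e1, h]
    simp only [Nat.add_zero, List.getD_cons_zero, k5, k8, k10, m5, m8, m10]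
    ring

theorem point5 (aa : Int) (r : Nat) (hr : r < 5) :
    (if ((5:Int),(0:Int),(1:Int)) = ((5:Int), (r : Int), aa) then (1:Int) else 0)
  + (if ((5:Int),(1:Int),(2:Int)) = ((5:Int), (r : Int), aa) then (1:Int) else 0)
  + (if ((5:Int),(2:Int),(3:Int)) = ((5:Int), (r : Int), aa) then (1:Int) else 0)
  + (if ((5:Int),(3:Int),(4:Int)) = ((5:Int), (r : Int), aa) then (1:Int) else 0)
  + (if ((5:Int),(4:Int),(5:Int)) = ((5:Int), (r : Int), aa) then (1:Int) else 0)
  = if aa = ([1,2,3,4,5] : List Int).getD r 0 then 1 else 0 := by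
  interval_cases r <;> simp [Prod.mk.injEq, eq_comm]

theorem collapse5 (aa : Nat → Int) : ∀ n,
    cnt (fun i => ((5:Int),(0:Int),(1:Int)) = ((5:Int), ((i % 5 : Nat) : Int), aa i)) n
  + cnt (fun i => ((5:Int),(1:Int),(2:Int)) = ((5:Int), ((i % 5 : Nat) : Int), aa i)) n
  + cnt (fun i => ((5:Int),(2:Int),(3:Int)) = ((5:Int), ((i % 5 : Nat) : Int), aa i)) n
  + cnt (fun i => ((5:Int),(3:Int),(4:Int)) = ((5:Int), ((i % 5 : Nat) : Int), aa i)) n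
  + cnt (fun i => ((5:Int),(4:Int),(5:Int)) = ((5:Int), ((i % 5 : Nat) : Int), aa i)) n
  = cnt (fun i => aa i = ([1,2,3,4,5] : List Int).getD (i % 5) 0) n := by
  intro n
  induction n with
  | zero => rfl
  | succ n ih =>
    simp only [cnt]
    have hp := point5 (aa n) (n % 5) (by omega)
    linarith

theorem bucket5 (xs : List Int) (j v : Int) :
    ((PySem.List.enumerate xs 0).foldl
      (fun d p => [(5:Int),8,10].foldl
        (fun d L => let key := (L, PySem.Int.mod p.1 L, p.2); d.insert key (d.getD key 0 + 1)) d)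
      PySem.Dict.empty).getD ((5:Int), j, v) 0
  = cnt (fun i => ((5:Int), j, v) = ((5:Int), ((i % 5 : Nat) : Int), xs.getD i 0)) xs.length := by
  have hb := build_getD xs 0 PySem.Dict.empty ((5:Int), j, v)
  simp only [Nat.cast_zero, Nat.zero_add] at hb
  rw [hb, PySem.Dict.getD_empty]
  rw [cnt_false (fun i => ((5:Int), j, v) = ((8:Int), ((i % 8 : Nat) : Int), xs.getD i 0))
    (fun i h => absurd (congrArg Prod.fst h) (by norm_num)) xs.length]
  rw [cnt_false (fun i => ((5:Int), j, v) = ((10:Int), ((i % 10 : Nat) : Int), xs.getD i 0))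
    (fun i h => absurd (congrArg Prod.fst h) (by norm_num)) xs.length]
  ring

theorem point8 (aa : Int) (r : Nat) (hr : r < 8) :
    (if ((8:Int),(0:Int),(2:Int)) = ((8:Int), (r : Int), aa) then (1:Int) else 0)
  + (if ((8:Int),(1:Int),(1:Int)) = ((8:Int), (r : Int), aa) then (1:Int) else 0)
  + (if ((8:Int),(2:Int),(2:Int)) = ((8:Int), (r : Int), aa) then (1:Int) else 0)
  + (if ((8:Int),(3:Int),(3:Int)) = ((8:Int), (r : Int), aa) then (1:Int) else 0)
  + (if ((8:Int),(4:Int),(2:Int)) = ((8:Int), (r : Int), aa) then (1:Int) else 0)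
  + (if ((8:Int),(5:Int),(4:Int)) = ((8:Int), (r : Int), aa) then (1:Int) else 0)
  + (if ((8:Int),(6:Int),(2:Int)) = ((8:Int), (r : Int), aa) then (1:Int) else 0)
  + (if ((8:Int),(7:Int),(5:Int)) = ((8:Int), (r : Int), aa) then (1:Int) else 0)
  = if aa = ([2,1,2,3,2,4,2,5] : List Int).getD r 0 then 1 else 0 := by
  interval_cases r <;> simp [Prod.mk.injEq, eq_comm]

theorem collapse8 (aa : Nat → Int) : ∀ n,
    cnt (fun i => ((8:Int),(0:Int),(2:Int)) = ((8:Int), ((i % 8 : Nat) : Int), aa i)) n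
  + cnt (fun i => ((8:Int),(1:Int),(1:Int)) = ((8:Int), ((i % 8 : Nat) : Int), aa i)) n
  + cnt (fun i => ((8:Int),(2:Int),(2:Int)) = ((8:Int), ((i % 8 : Nat) : Int), aa i)) n
  + cnt (fun i => ((8:Int),(3:Int),(3:Int)) = ((8:Int), ((i % 8 : Nat) : Int), aa i)) n
  + cnt (fun i => ((8:Int),(4:Int),(2:Int)) = ((8:Int), ((i % 8 : Nat) : Int), aa i)) n
  + cnt (fun i => ((8:Int),(5:Int),(4:Int)) = ((8:Int), ((i % 8 : Nat) : Int), aa i)) n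
  + cnt (fun i => ((8:Int),(6:Int),(2:Int)) = ((8:Int), ((i % 8 : Nat) : Int), aa i)) n
  + cnt (fun i => ((8:Int),(7:Int),(5:Int)) = ((8:Int), ((i % 8 : Nat) : Int), aa i)) n
  = cnt (fun i => aa i = ([2,1,2,3,2,4,2,5] : List Int).getD (i % 8) 0) n := by
  intro n
  induction n with
  | zero => rfl
  | succ n ih =>
    simp only [cnt]
    have hp := point8 (aa n) (n % 8) (by omega)
    linarith

theorem bucket8 (xs : List Int) (j v : Int) :
    ((PySem.List.enumerate xs 0).foldl
      (fun d p => [(5:Int),8,10].foldl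
        (fun d L => let key := (L, PySem.Int.mod p.1 L, p.2); d.insert key (d.getD key 0 + 1)) d)
      PySem.Dict.empty).getD ((8:Int), j, v) 0
  = cnt (fun i => ((8:Int), j, v) = ((8:Int), ((i % 8 : Nat) : Int), xs.getD i 0)) xs.length := by
  have hb := build_getD xs 0 PySem.Dict.empty ((8:Int), j, v)
  simp only [Nat.cast_zero, Nat.zero_add] at hb
  rw [hb, PySem.Dict.getD_empty]
  rw [cnt_false (fun i => ((8:Int), j, v) = ((5:Int), ((i % 5 : Nat) : Int), xs.getD i 0))
    (fun i h => absurd (congrArg Prod.fst h) (by norm_num)) xs.length]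
  rw [cnt_false (fun i => ((8:Int), j, v) = ((10:Int), ((i % 10 : Nat) : Int), xs.getD i 0))
    (fun i h => absurd (congrArg Prod.fst h) (by norm_num)) xs.length]
  ring

theorem point10 (aa : Int) (r : Nat) (hr : r < 10) :
    (if ((10:Int),(0:Int),(3:Int)) = ((10:Int), (r : Int), aa) then (1:Int) else 0)
  + (if ((10:Int),(1:Int),(3:Int)) = ((10:Int), (r : Int), aa) then (1:Int) else 0)
  + (if ((10:Int),(2:Int),(1:Int)) = ((10:Int), (r : Int), aa) then (1:Int) else 0)
  + (if ((10:Int),(3:Int),(1:Int)) = ((10:Int), (r : Int), aa) then (1:Int) else 0)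
  + (if ((10:Int),(4:Int),(2:Int)) = ((10:Int), (r : Int), aa) then (1:Int) else 0)
  + (if ((10:Int),(5:Int),(2:Int)) = ((10:Int), (r : Int), aa) then (1:Int) else 0)
  + (if ((10:Int),(6:Int),(4:Int)) = ((10:Int), (r : Int), aa) then (1:Int) else 0)
  + (if ((10:Int),(7:Int),(4:Int)) = ((10:Int), (r : Int), aa) then (1:Int) else 0)
  + (if ((10:Int),(8:Int),(5:Int)) = ((10:Int), (r : Int), aa) then (1:Int) else 0)
  + (if ((10:Int),(9:Int),(5:Int)) = ((10:Int), (r : Int), aa) then (1:Int) else 0)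
  = if aa = ([3,3,1,1,2,2,4,4,5,5] : List Int).getD r 0 then 1 else 0 := by
  interval_cases r <;> simp [Prod.mk.injEq, eq_comm]

theorem collapse10 (aa : Nat → Int) : ∀ n,
    cnt (fun i => ((10:Int),(0:Int),(3:Int)) = ((10:Int), ((i % 10 : Nat) : Int), aa i)) n
  + cnt (fun i => ((10:Int),(1:Int),(3:Int)) = ((10:Int), ((i % 10 : Nat) : Int), aa i)) n
  + cnt (fun i => ((10:Int),(2:Int),(1:Int)) = ((10:Int), ((i % 10 : Nat) : Int), aa i)) n
  + cnt (fun i => ((10:Int),(3:Int),(1:Int)) = ((10:Int), ((i % 10 : Nat) : Int), aa i)) n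
  + cnt (fun i => ((10:Int),(4:Int),(2:Int)) = ((10:Int), ((i % 10 : Nat) : Int), aa i)) n
  + cnt (fun i => ((10:Int),(5:Int),(2:Int)) = ((10:Int), ((i % 10 : Nat) : Int), aa i)) n
  + cnt (fun i => ((10:Int),(6:Int),(4:Int)) = ((10:Int), ((i % 10 : Nat) : Int), aa i)) n
  + cnt (fun i => ((10:Int),(7:Int),(4:Int)) = ((10:Int), ((i % 10 : Nat) : Int), aa i)) n
  + cnt (fun i => ((10:Int),(8:Int),(5:Int)) = ((10:Int), ((i % 10 : Nat) : Int), aa i)) n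
  + cnt (fun i => ((10:Int),(9:Int),(5:Int)) = ((10:Int), ((i % 10 : Nat) : Int), aa i)) n
  = cnt (fun i => aa i = ([3,3,1,1,2,2,4,4,5,5] : List Int).getD (i % 10) 0) n := by
  intro n
  induction n with
  | zero => rfl
  | succ n ih =>
    simp only [cnt]
    have hp := point10 (aa n) (n % 10) (by omega)
    linarith

theorem bucket10 (xs : List Int) (j v : Int) :
    ((PySem.List.enumerate xs 0).foldl
      (fun d p => [(5:Int),8,10].foldl
        (fun d L => let key := (L, PySem.Int.mod p.1 L, p.2); d.insert key (d.getD key 0 + 1)) d)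
      PySem.Dict.empty).getD ((10:Int), j, v) 0
  = cnt (fun i => ((10:Int), j, v) = ((10:Int), ((i % 10 : Nat) : Int), xs.getD i 0)) xs.length := by
  have hb := build_getD xs 0 PySem.Dict.empty ((10:Int), j, v)
  simp only [Nat.cast_zero, Nat.zero_add] at hb
  rw [hb, PySem.Dict.getD_empty]
  rw [cnt_false (fun i => ((10:Int), j, v) = ((5:Int), ((i % 5 : Nat) : Int), xs.getD i 0))
    (fun i h => absurd (congrArg Prod.fst h) (by norm_num)) xs.length]
  rw [cnt_false (fun i => ((10:Int), j, v) = ((8:Int), ((i % 8 : Nat) : Int), xs.getD i 0))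
    (fun i h => absurd (congrArg Prod.fst h) (by norm_num)) xs.length]
  ring


theorem cntA5 (answers : List Int) :
    cnt (fun i => answers.getD i 0 = (pyRepeat [1,2,3,4,5] (answers.length / 5 + 1)).getD i 0) answers.length
  = cnt (fun i => answers.getD i 0 = ([1,2,3,4,5] : List Int).getD (i % 5) 0) answers.length := by
  have h := cnt_pattern answers [1,2,3,4,5] (answers.length / 5 + 1) (by norm_num)
    (le_of_lt (lt_bound answers.length 5 (by norm_num)))
  rw [h]
  apply cnt_congr
  intro i _
  norm_num

theorem cntA8 (answers : List Int) :
    cnt (fun i => answers.getD i 0 = (pyRepeat [2,1,2,3,2,4,2,5] (answers.length / 8 + 1)).getD i 0) answers.length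
  = cnt (fun i => answers.getD i 0 = ([2,1,2,3,2,4,2,5] : List Int).getD (i % 8) 0) answers.length := by
  have h := cnt_pattern answers [2,1,2,3,2,4,2,5] (answers.length / 8 + 1) (by norm_num)
    (le_of_lt (lt_bound answers.length 8 (by norm_num)))
  rw [h]
  apply cnt_congr
  intro i _
  norm_num

theorem cntA10 (answers : List Int) :
    cnt (fun i => answers.getD i 0 = (pyRepeat [3,3,1,1,2,2,4,4,5,5] (answers.length / 10 + 1)).getD i 0) answers.length
  = cnt (fun i => answers.getD i 0 = ([3,3,1,1,2,2,4,4,5,5] : List Int).getD (i % 10) 0) answers.length := by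
  have h := cnt_pattern answers [3,3,1,1,2,2,4,4,5,5] (answers.length / 10 + 1) (by norm_num)
    (le_of_lt (lt_bound answers.length 10 (by norm_num)))
  rw [h]
  apply cnt_congr
  intro i _
  norm_num

theorem scores_eq (answers : List Int) :
    ([[1,2,3,4,5],[2,1,2,3,2,4,2,5],[3,3,1,1,2,2,4,4,5,5]] : List (List Int)).map
      (fun p => (PySem.List.enumerate p).foldl
        (fun s q => s + ((PySem.List.enumerate answers).foldl
            (fun d p => [(5:Int),8,10].foldl
              (fun d L => let key := (L, PySem.Int.mod p.1 L, p.2); d.insert key (d.getD key 0 + 1)) d)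
            PySem.Dict.empty).getD ((p.length : Int), q.1, q.2) 0) 0)
  = [cnt (fun i => answers.getD i 0 = ([1,2,3,4,5] : List Int).getD (i % 5) 0) answers.length,
     cnt (fun i => answers.getD i 0 = ([2,1,2,3,2,4,2,5] : List Int).getD (i % 8) 0) answers.length,
     cnt (fun i => answers.getD i 0 = ([3,3,1,1,2,2,4,4,5,5] : List Int).getD (i % 10) 0) answers.length] := by
  generalize hB : (PySem.List.enumerate answers).foldl
      (fun (d : PySem.Dict (Int × Int × Int) Int) p => [(5:Int),8,10].foldl
        (fun d L => let key := (L, PySem.Int.mod p.1 L, p.2); d.insert key (d.getD key 0 + 1)) d)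
      PySem.Dict.empty = B
  simp only [List.map_cons, List.map_nil, PySem.List.enumerate_cons, PySem.List.enumerate_nil,
             List.foldl_cons, List.foldl_nil, List.length_cons, List.length_nil]
  norm_num
  subst hB
  simp only [bucket5, bucket8, bucket10]
  refine ⟨?_, ?_, ?_⟩
  · rw [collapse5 (fun i => answers.getD i 0)]
    exact cnt_congr _ _ _ (fun i _ => by simp [List.getD_eq_getElem?_getD])
  · rw [collapse8 (fun i => answers.getD i 0)]
    exact cnt_congr _ _ _ (fun i _ => by simp [List.getD_eq_getElem?_getD])
  · rw [collapse10 (fun i => answers.getD i 0)]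
    exact cnt_congr _ _ _ (fun i _ => by simp [List.getD_eq_getElem?_getD])

-- ===== VERDICT (by name: the statement is the Claim_ definition above) =====
theorem solution_spec : Claim_equal_solution := by
  intro answers _
  unfold Spec_solution solution solution_alt
  dsimp only []
  rw [tripleFold (fun i => answers.getD i 0 = (pyRepeat [1,2,3,4,5] (answers.length / 5 + 1)).getD i 0)
        (fun i => answers.getD i 0 = (pyRepeat [2,1,2,3,2,4,2,5] (answers.length / 8 + 1)).getD i 0)
        (fun i => answers.getD i 0 = (pyRepeat [3,3,1,1,2,2,4,4,5,5] (answers.length / 10 + 1)).getD i 0)]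
  rw [cntA5 answers, cntA8 answers, cntA10 answers]
  rw [scores_eq answers]
  generalize cnt (fun i => answers.getD i 0 = ([1,2,3,4,5] : List Int).getD (i % 5) 0) answers.length = c1
  generalize cnt (fun i => answers.getD i 0 = ([2,1,2,3,2,4,2,5] : List Int).getD (i % 8) 0) answers.length = c2
  generalize cnt (fun i => answers.getD i 0 = ([3,3,1,1,2,2,4,4,5,5] : List Int).getD (i % 10) 0) answers.length = c3
  simp [List.range_succ, PySem.List.enumerate_cons, PySem.List.enumerate_nil]
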